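-- pv_equiv track=rewrite | github.com/NOAA-OWP/t-route | build/lib/troute-network/troute/nhd_network.py | dfs_count_depth
-- ===== SOURCE A (Python) =====
-- def dfs_count_depth(RN, source_nodes=None):
--     """
--     Returns tree depth, via depth-first-search of every element
--     in a network.
--
--     The count assumes that every element will be counted, so
--     if the objective is to identify reach depth, the network
--     must first be coalesced.
--     """
--
--     path_tuples = []
--     reach_seq_order = 0
--     visited = set()
--     junctions = set()
--     for h in source_nodes:
--         stack = [(h, iter(RN[h]))]
--         while stack:
--             node, children = stack[-1]
--             if node not in junctions:
--                 reach_seq_order += 1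
--                 junctions.add(node)
--             try:
--                 child = next(children)
--                 if child not in visited:
--                     # Check to see if we are at a leaf
--                     if child in RN:
--                         stack.append((child, iter(RN[child])))
--                     visited.add(child)
--             except StopIteration:
--                 node, _ = stack.pop()
--
--                 reach_seq_order -= 1
--                 path_tuples.append((reach_seq_order, [node]))
--
--     return path_tuples
-- ===== SOURCE B (Python) =====
-- def dfs_count_depth(RN, source_nodes=None):
--     """Recursive DFS re-implementation: same result as the iterative
--     stack-based original (shared counter/sets across sources, unconditional
--     decrement on exit)."""
--     path_tuples = []
--     visited = set()
--     junctions = set()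
--     counter = [0]
--
--     def visit(node):
--         if node not in junctions:
--             counter[0] += 1
--             junctions.add(node)
--         for child in RN[node]:
--             if child not in visited:
--                 visited.add(child)
--                 if child in RN:
--                     visit(child)
--         counter[0] -= 1
--         path_tuples.append((counter[0], [node]))
--
--     for h in source_nodes:
--         visit(h)
--     return path_tuples
-- ===== Notes on version B (the rewrite author's own statement) =====
-- stated objective: alternative
-- what changed: Replaced the iterative explicit-stack-of-iterators DFS loop by a recursive visit() helper over shared mutable state (one counter cell, shared visited/junctions sets across sources), preserving the shared-counter decrement-on-exit behaviour.
import Mathlib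
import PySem

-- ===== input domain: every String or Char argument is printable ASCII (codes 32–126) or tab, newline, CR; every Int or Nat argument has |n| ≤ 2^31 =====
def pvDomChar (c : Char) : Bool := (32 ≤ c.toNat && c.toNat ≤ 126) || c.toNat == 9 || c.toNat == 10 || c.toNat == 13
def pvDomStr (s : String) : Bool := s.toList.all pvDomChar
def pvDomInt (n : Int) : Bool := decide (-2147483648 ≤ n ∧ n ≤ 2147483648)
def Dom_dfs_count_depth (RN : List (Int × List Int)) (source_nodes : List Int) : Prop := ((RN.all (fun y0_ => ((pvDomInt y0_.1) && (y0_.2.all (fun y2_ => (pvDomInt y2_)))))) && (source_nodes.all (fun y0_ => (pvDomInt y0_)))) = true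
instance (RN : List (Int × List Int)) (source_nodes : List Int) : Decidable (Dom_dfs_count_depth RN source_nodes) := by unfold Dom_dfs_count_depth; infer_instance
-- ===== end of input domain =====

-- B rewrites the iterative explicit-stack DFS as a recursive visit() over the same shared
-- state (single counter, shared visited/junctions across sources); objective: alternative
-- decomposition, same exact results.

-- ===== PORT A =====
-- Shared state record: (path_tuples, reach_seq_order, visited, junctions).
structure DfsSt where
  path : List (Int × List Int)
  ctr : Int
  vis : PySem.Set Int
  junc : PySem.Set Int
deriving Repr, DecidableEq

-- "if node not in junctions: reach_seq_order += 1; junctions.add(node)"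
def dfsTouch (node : Int) (s : DfsSt) : DfsSt :=
  if node ∈ s.junc then s else { s with ctr := s.ctr + 1, junc := PySem.Set.add s.junc node }

-- "node, _ = stack.pop(); reach_seq_order -= 1; path_tuples.append((reach_seq_order, [node]))"
def dfsFinish (node : Int) (s : DfsSt) : DfsSt :=
  { s with ctr := s.ctr - 1, path := s.path ++ [(s.ctr - 1, [node])] }

-- termination helpers for the while-loop port
def dfsKeys (RN : List (Int × List Int)) : List Int := RN.map Prod.fst

def dfsUnvis (RN : List (Int × List Int)) (v : List Int) : Nat :=
  (PySem.List.dedup (dfsKeys RN)).countP (fun k => !decide (k ∈ v))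

def dfsRowSum (RN : List (Int × List Int)) : Nat := (RN.map (fun p => p.2.length)).sum

def dfsStackW (stack : List (Int × List Int)) : Nat := (stack.map (fun f => f.2.length + 1)).sum

theorem dfsCountP_lt {l : List Int} {p q : Int → Bool} (h : ∀ x ∈ l, p x → q x)
    (x0 : Int) (hx0 : x0 ∈ l) (hq : q x0 = true) (hp : p x0 = false) :
    l.countP p < l.countP q := by
  induction l with
  | nil => cases hx0
  | cons a l ih =>
    rcases List.mem_cons.mp hx0 with rfl | hmem
    · have hle : l.countP p ≤ l.countP q :=
        List.countP_mono_left (fun x hx => h x (List.mem_cons_of_mem _ hx))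
      simp [hp, hq]; omega
    · have hlt : l.countP p < l.countP q :=
        ih (fun x hx => h x (List.mem_cons_of_mem _ hx)) hmem
      by_cases hpa : p a = true
      · have hqa : q a = true := h a (List.mem_cons_self) hpa
        simp [hpa, hqa]; omega
      · simp only [List.countP_cons]
        have : p a = false := by simpa using hpa
        simp [this]; omega

theorem dfsUnvis_add_lt (RN : List (Int × List Int)) {v : List Int} {c : Int}
    (hc : c ∈ dfsKeys RN) (hv : c ∉ v) :
    dfsUnvis RN (PySem.Set.add v c) < dfsUnvis RN v := by
  apply dfsCountP_lt (x0 := c)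
  · intro x _
    simp only [Bool.not_eq_eq_eq_not, Bool.not_true, decide_eq_false_iff_not,
      PySem.Set.mem_add]
    tauto
  · exact (PySem.List.mem_dedup _ _).mpr hc
  · simp [hv]
  · simp [PySem.Set.mem_add]

theorem dfsUnvis_add_eq (RN : List (Int × List Int)) {v : List Int} {c : Int}
    (hc : c ∉ dfsKeys RN) :
    dfsUnvis RN (PySem.Set.add v c) = dfsUnvis RN v := by
  apply List.countP_congr
  intro x hx
  have hxk : x ∈ dfsKeys RN := (PySem.List.mem_dedup _ _).mp hx
  have hne : x ≠ c := fun h => hc (h ▸ hxk)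
  simp [PySem.Set.mem_add, hne]

theorem dfsRow_le (RN : List (Int × List Int)) (c : Int) :
    ((PySem.Dict.mk RN).getD c []).length ≤ dfsRowSum RN := by
  rw [PySem.Dict.getD_eq_get?_getD]
  cases hg : (PySem.Dict.mk RN).get? c with
  | none => simp
  | some v =>
    have hmem : (c, v) ∈ (PySem.Dict.mk RN).items := PySem.Dict.mem_items_of_get?_eq_some _ hg
    have : v.length ∈ RN.map (fun p => p.2.length) := by
      refine List.mem_map.mpr ⟨(c, v), ?_, rfl⟩
      exact hmem
    simpa [dfsRowSum] using List.single_le_sum (fun x _ => Nat.zero_le x) _ this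

theorem dfsContains_mem {RN : List (Int × List Int)} {c : Int}
    (h : (PySem.Dict.mk RN).contains c = true) : c ∈ dfsKeys RN := by
  have := (PySem.Dict.contains_iff_mem_keys _ _).mp h
  simpa [PySem.Dict.keys, dfsKeys] using this

theorem dfsTouch_vis (node : Int) (s : DfsSt) : (dfsTouch node s).vis = s.vis := by
  unfold dfsTouch; split <;> rfl

theorem dfsFinish_vis (node : Int) (s : DfsSt) : (dfsFinish node s).vis = s.vis := rfl

-- the Python while-loop over the explicit stack of (node, remaining-children) frames
def dfsLoop (RN : List (Int × List Int)) : List (Int × List Int) → DfsSt → DfsSt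
  | [], s => s
  | (node, cs) :: rest, s =>
    let s1 := dfsTouch node s
    match cs with
    | [] => dfsLoop RN rest (dfsFinish node s1)
    | c :: cs' =>
      if c ∈ s1.vis then dfsLoop RN ((node, cs') :: rest) s1
      else
        let s2 := { s1 with vis := PySem.Set.add s1.vis c }
        if (PySem.Dict.mk RN).contains c then
          dfsLoop RN ((c, (PySem.Dict.mk RN).getD c []) :: (node, cs') :: rest) s2
        else
          dfsLoop RN ((node, cs') :: rest) s2
termination_by stack s => dfsUnvis RN s.vis * (dfsRowSum RN + 2) + dfsStackW stack
decreasing_by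
  · simp only [dfsFinish_vis, dfsTouch_vis, dfsStackW, List.map_cons, List.sum_cons,
      List.length_nil]
    omega
  · simp only [dfsTouch_vis, dfsStackW, List.map_cons, List.sum_cons, List.length_cons]
    omega
  · rename_i hvis hkey
    have h1 : dfsUnvis RN (PySem.Set.add (dfsTouch node s).vis c) < dfsUnvis RN s.vis := by
      rw [dfsTouch_vis] at *
      exact dfsUnvis_add_lt RN (dfsContains_mem hkey) hvis
    have h2 : ((PySem.Dict.mk RN).getD c []).length ≤ dfsRowSum RN := dfsRow_le RN c
    have h3 : dfsUnvis RN (PySem.Set.add (dfsTouch node s).vis c) * (dfsRowSum RN + 2) + (dfsRowSum RN + 2)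
        ≤ dfsUnvis RN s.vis * (dfsRowSum RN + 2) := by
      have := Nat.succ_le_of_lt h1
      calc dfsUnvis RN (PySem.Set.add (dfsTouch node s).vis c) * (dfsRowSum RN + 2) + (dfsRowSum RN + 2)
        = (dfsUnvis RN (PySem.Set.add (dfsTouch node s).vis c) + 1) * (dfsRowSum RN + 2) := by ring
      _ ≤ dfsUnvis RN s.vis * (dfsRowSum RN + 2) := Nat.mul_le_mul_right _ this
    simp only [dfsStackW, List.map_cons, List.sum_cons, List.length_cons]
    omega
  · rename_i hvis hkey
    have h1 : dfsUnvis RN (PySem.Set.add (dfsTouch node s).vis c) = dfsUnvis RN s.vis := by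
      rw [dfsTouch_vis]
      exact dfsUnvis_add_eq RN (fun hc => hkey
        ((PySem.Dict.contains_iff_mem_keys _ _).mpr (by simpa [PySem.Dict.keys, dfsKeys] using hc)))
    simp only [dfsStackW, List.map_cons, List.sum_cons, List.length_cons]
    rw [h1]
    omega

-- "for h in source_nodes: stack = [(h, iter(RN[h]))]; while stack: …"; returns path_tuples.
-- RN[h] is a plain lookup (getD is exact under Pre_, where h is a key of RN).
def dfs_count_depth (RN : List (Int × List Int)) (source_nodes : List Int) : List (Int × List Int) :=
  (source_nodes.foldl
    (fun s h => dfsLoop RN [(h, (PySem.Dict.mk RN).getD h [])] s)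
    ⟨[], 0, [], []⟩).path

-- ===== PORT B =====
-- recursive visit(node) over the shared state; the Nat argument is a fuel bound
-- (recursion depth ≤ distinct keys + 1 ≤ RN.length + 1, so it never runs out): totality guard only.
mutual
def dfsVisit (RN : List (Int × List Int)) : Nat → Int → DfsSt → DfsSt
  | 0, _, s => s
  | fuel + 1, node, s =>
    let s1 := if node ∈ s.junc then s
              else { s with ctr := s.ctr + 1, junc := PySem.Set.add s.junc node }
    let s2 := dfsChildren RN fuel ((PySem.Dict.mk RN).getD node []) s1
    { s2 with ctr := s2.ctr - 1, path := s2.path ++ [(s2.ctr - 1, [node])] }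
termination_by fuel _ _ => (fuel, 0)

def dfsChildren (RN : List (Int × List Int)) : Nat → List Int → DfsSt → DfsSt
  | _, [], s => s
  | fuel, c :: cs, s =>
    if c ∈ s.vis then dfsChildren RN fuel cs s
    else
      let s1 := { s with vis := PySem.Set.add s.vis c }
      if (PySem.Dict.mk RN).contains c then dfsChildren RN fuel cs (dfsVisit RN fuel c s1)
      else dfsChildren RN fuel cs s1
termination_by fuel cs _ => (fuel, cs.length + 1)
end

def dfs_count_depth_alt (RN : List (Int × List Int)) (source_nodes : List Int) : List (Int × List Int) :=
  (source_nodes.foldl (fun s h => dfsVisit RN (RN.length + 1) h s) ⟨[], 0, [], []⟩).path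

-- ===== PRECONDITION & SPEC =====
-- Pre_ excludes exactly the inputs where Python A raises KeyError: a source node that is
-- not a key of RN (RN[h] on the stack-initialisation line; B's RN[node] raises there too).
def Pre_dfs_count_depth (RN : List (Int × List Int)) (source_nodes : List Int) : Prop :=
  ∀ h ∈ source_nodes, h ∈ RN.map Prod.fst
instance (RN : List (Int × List Int)) (source_nodes : List Int) : Decidable (Pre_dfs_count_depth RN source_nodes) := by unfold Pre_dfs_count_depth; infer_instance

def pvWitness_dfs_count_depth : (List (Int × List Int)) × List Int := ([(0, [1, 2]), (1, [])], [0])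

def Spec_dfs_count_depth (RN : List (Int × List Int)) (source_nodes : List Int) (out : List (Int × List Int)) : Prop := out = dfs_count_depth_alt RN source_nodes
instance (RN : List (Int × List Int)) (source_nodes : List Int) (out : List (Int × List Int)) : Decidable (Spec_dfs_count_depth RN source_nodes out) := by unfold Spec_dfs_count_depth; infer_instance

-- ===== CLAIM (what is proved, stated in full; the proofs are below) =====
def Claim_equal_dfs_count_depth : Prop := ∀ (RN : List (Int × List Int)) (source_nodes : List Int), Dom_dfs_count_depth RN source_nodes → Pre_dfs_count_depth RN source_nodes → Spec_dfs_count_depth RN source_nodes (dfs_count_depth RN source_nodes)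

-- ===== LEMMAS AND PROOFS =====

theorem dfsUnvis_subset_le (RN : List (Int × List Int)) {v w : List Int}
    (h : ∀ x ∈ v, x ∈ w) : dfsUnvis RN w ≤ dfsUnvis RN v := by
  apply List.countP_mono_left
  intro x _ hx
  simp only [Bool.not_eq_eq_eq_not, Bool.not_true, decide_eq_false_iff_not] at *
  intro hxv; exact hx (h x hxv)


theorem dfsTouch_junc_self (node : Int) (s : DfsSt) : node ∈ (dfsTouch node s).junc := by
  unfold dfsTouch
  split
  · assumption
  · exact (PySem.Set.mem_add _ _ _).mpr (Or.inr rfl)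

theorem dfsTouch_eq_of_mem {node : Int} {s : DfsSt} (h : node ∈ s.junc) : dfsTouch node s = s := by
  unfold dfsTouch
  simp [h]

theorem dfsTouch_idem (node : Int) (s : DfsSt) :
    dfsTouch node (dfsTouch node s) = dfsTouch node s :=
  dfsTouch_eq_of_mem (dfsTouch_junc_self node s)

theorem dfsUnvis_pos (RN : List (Int × List Int)) {v : List Int} {c : Int}
    (hc : c ∈ dfsKeys RN) (hv : c ∉ v) : 0 < dfsUnvis RN v := by
  refine List.countP_pos_iff.mpr ⟨c, (PySem.List.mem_dedup _ _).mpr hc, by simp [hv]⟩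

-- visited and junctions only grow through a recursive visit
theorem dfsMono (RN : List (Int × List Int)) : ∀ (fuel : Nat),
    (∀ (node : Int) (s : DfsSt) (x : Int),
      (x ∈ s.vis → x ∈ (dfsVisit RN fuel node s).vis) ∧
      (x ∈ s.junc → x ∈ (dfsVisit RN fuel node s).junc)) ∧
    (∀ (cs : List Int) (s : DfsSt) (x : Int),
      (x ∈ s.vis → x ∈ (dfsChildren RN fuel cs s).vis) ∧
      (x ∈ s.junc → x ∈ (dfsChildren RN fuel cs s).junc)) := by
  intro fuel
  induction fuel with
  | zero =>
    have hV : ∀ (node : Int) (s : DfsSt) (x : Int),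
        (x ∈ s.vis → x ∈ (dfsVisit RN 0 node s).vis) ∧
        (x ∈ s.junc → x ∈ (dfsVisit RN 0 node s).junc) := by
      intro node s x; simp [dfsVisit]
    refine ⟨hV, ?_⟩
    intro cs
    induction cs with
    | nil => intro s x; simp [dfsChildren]
    | cons c cs ih =>
      intro s x
      simp only [dfsChildren]
      split
      · exact ih s x
      · split
        · refine ⟨fun hx => ?_, fun hx => ?_⟩
          · exact (ih _ x).1 ((hV c _ x).1 ((PySem.Set.mem_add _ _ _).mpr (Or.inl hx)))
          · exact (ih _ x).2 ((hV c _ x).2 hx)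
        · refine ⟨fun hx => ?_, fun hx => ?_⟩
          · exact (ih _ x).1 ((PySem.Set.mem_add _ _ _).mpr (Or.inl hx))
          · exact (ih _ x).2 hx
  | succ fuel ihf =>
    have hV : ∀ (node : Int) (s : DfsSt) (x : Int),
        (x ∈ s.vis → x ∈ (dfsVisit RN (fuel + 1) node s).vis) ∧
        (x ∈ s.junc → x ∈ (dfsVisit RN (fuel + 1) node s).junc) := by
      intro node s x
      simp only [dfsVisit]
      refine ⟨fun hx => ?_, fun hx => ?_⟩
      · exact (ihf.2 _ _ x).1 (by split <;> exact hx)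
      · refine (ihf.2 _ _ x).2 ?_
        split
        · exact hx
        · exact (PySem.Set.mem_add _ _ _).mpr (Or.inl hx)
    refine ⟨hV, ?_⟩
    intro cs
    induction cs with
    | nil => intro s x; simp [dfsChildren]
    | cons c cs ih =>
      intro s x
      simp only [dfsChildren]
      split
      · exact ih s x
      · split
        · refine ⟨fun hx => ?_, fun hx => ?_⟩
          · exact (ih _ x).1 ((hV c _ x).1 ((PySem.Set.mem_add _ _ _).mpr (Or.inl hx)))
          · exact (ih _ x).2 ((hV c _ x).2 hx)
        · refine ⟨fun hx => ?_, fun hx => ?_⟩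
          · exact (ih _ x).1 ((PySem.Set.mem_add _ _ _).mpr (Or.inl hx))
          · exact (ih _ x).2 hx

theorem dfsUnvis_visit_le (RN : List (Int × List Int)) (fuel : Nat) (node : Int) (s : DfsSt) :
    dfsUnvis RN (dfsVisit RN fuel node s).vis ≤ dfsUnvis RN s.vis :=
  dfsUnvis_subset_le RN (fun x hx => ((dfsMono RN fuel).1 node s x).1 hx)

-- with enough fuel (more than the number of unvisited keys), one more unit changes nothing
theorem dfsStep (RN : List (Int × List Int)) : ∀ (fuel : Nat),
    (∀ (node : Int) (s : DfsSt), dfsUnvis RN s.vis < fuel →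
      dfsVisit RN fuel node s = dfsVisit RN (fuel + 1) node s) ∧
    (∀ (cs : List Int) (s : DfsSt), dfsUnvis RN s.vis ≤ fuel →
      dfsChildren RN fuel cs s = dfsChildren RN (fuel + 1) cs s) := by
  intro fuel
  induction fuel with
  | zero =>
    refine ⟨fun node s h => absurd h (Nat.not_lt_zero _), ?_⟩
    intro cs
    induction cs with
    | nil => intro s h; simp [dfsChildren]
    | cons c cs ih =>
      intro s h
      simp only [dfsChildren]
      split
      · exact ih s h
      · rename_i hvis
        split
        · rename_i hkey
          exact absurd (dfsUnvis_pos RN (dfsContains_mem hkey) hvis) (by omega)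
        · rename_i hkey
          refine ih _ ?_
          rw [show ({ s with vis := PySem.Set.add s.vis c } : DfsSt).vis
              = PySem.Set.add s.vis c from rfl,
            dfsUnvis_add_eq RN (fun hc => hkey
              ((PySem.Dict.contains_iff_mem_keys _ _).mpr
                (by simpa [PySem.Dict.keys, dfsKeys] using hc)))]
          exact h
  | succ fuel ihf =>
    have hV : ∀ (node : Int) (s : DfsSt), dfsUnvis RN s.vis < fuel + 1 →
        dfsVisit RN (fuel + 1) node s = dfsVisit RN (fuel + 2) node s := by
      intro node s h
      simp only [dfsVisit]
      have hvt : (if node ∈ s.junc then s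
          else { s with ctr := s.ctr + 1, junc := PySem.Set.add s.junc node }).vis = s.vis := by
        split <;> rfl
      rw [ihf.2 ((PySem.Dict.mk RN).getD node [])
        (if node ∈ s.junc then s
          else { s with ctr := s.ctr + 1, junc := PySem.Set.add s.junc node })
        (by rw [hvt]; omega)]
    refine ⟨hV, ?_⟩
    intro cs
    induction cs with
    | nil => intro s h; simp [dfsChildren]
    | cons c cs ih =>
      intro s h
      simp only [dfsChildren]
      split
      · exact ih s h
      · rename_i hvis
        split
        · rename_i hkey
          have hlt : dfsUnvis RN (PySem.Set.add s.vis c) < dfsUnvis RN s.vis :=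
            dfsUnvis_add_lt RN (dfsContains_mem hkey) hvis
          have hv : dfsVisit RN (fuel + 1) c { s with vis := PySem.Set.add s.vis c }
              = dfsVisit RN (fuel + 2) c { s with vis := PySem.Set.add s.vis c } :=
            hV c _ (by simpa using by omega)
          rw [← hv]
          refine ih _ ?_
          calc dfsUnvis RN (dfsVisit RN (fuel + 1) c { s with vis := PySem.Set.add s.vis c }).vis
              ≤ dfsUnvis RN (PySem.Set.add s.vis c) := dfsUnvis_visit_le RN _ _ _
            _ ≤ fuel + 1 := by omega
        · rename_i hkey
          refine ih _ ?_
          rw [show ({ s with vis := PySem.Set.add s.vis c } : DfsSt).vis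
              = PySem.Set.add s.vis c from rfl,
            dfsUnvis_add_eq RN (fun hc => hkey
              ((PySem.Dict.contains_iff_mem_keys _ _).mpr
                (by simpa [PySem.Dict.keys, dfsKeys] using hc)))]
          exact h

theorem dfsVisit_add (RN : List (Int × List Int)) : ∀ (d fuel : Nat) (node : Int) (s : DfsSt),
    dfsUnvis RN s.vis < fuel → dfsVisit RN fuel node s = dfsVisit RN (fuel + d) node s := by
  intro d
  induction d with
  | zero => intro fuel node s _; rfl
  | succ d ih =>
    intro fuel node s h
    rw [← Nat.add_assoc, ih fuel node s h]
    exact (dfsStep RN (fuel + d)).1 node s (by omega)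

theorem dfsVisit_stab (RN : List (Int × List Int)) {f g : Nat} (node : Int) (s : DfsSt)
    (hf : dfsUnvis RN s.vis < f) (hg : dfsUnvis RN s.vis < g) :
    dfsVisit RN f node s = dfsVisit RN g node s := by
  rcases Nat.le_total f g with h | h
  · have := dfsVisit_add RN (g - f) f node s hf
    rwa [Nat.add_sub_cancel' h] at this
  · have := dfsVisit_add RN (f - g) g node s hg
    rw [Nat.add_sub_cancel' h] at this
    exact this.symm

-- the main bridge: one stack frame of the while loop = one recursive visit of its remaining children
theorem dfsMain (RN : List (Int × List Int)) : ∀ (u : Nat) (cs : List Int) (node : Int)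
    (rest : List (Int × List Int)) (s : DfsSt) (f : Nat),
    dfsUnvis RN s.vis ≤ u → dfsUnvis RN s.vis < f →
    dfsLoop RN ((node, cs) :: rest) s
      = dfsLoop RN rest (dfsFinish node (dfsChildren RN f cs (dfsTouch node s))) := by
  intro u
  induction u using Nat.strong_induction_on with
  | _ u ihu =>
  intro cs
  induction cs with
  | nil =>
    intro node rest s f _ _
    simp [dfsLoop, dfsChildren]
  | cons c cs' ihcs =>
    intro node rest s f hu hf
    have hvis1 : (dfsTouch node s).vis = s.vis := dfsTouch_vis node s
    simp only [dfsLoop]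
    split
    · -- child already visited
      rename_i hv
      rw [ihcs node rest (dfsTouch node s) f (by rw [hvis1]; exact hu) (by rw [hvis1]; exact hf),
        dfsTouch_idem]
      simp only [dfsChildren]
      rw [if_pos hv]
    · rename_i hv
      split
      · -- unvisited child that is itself a key: the loop pushes, visit recurses
        rename_i hk
        have hck : c ∈ dfsKeys RN := dfsContains_mem hk
        have hcv : c ∉ s.vis := by rwa [hvis1] at hv
        have hlt : dfsUnvis RN (PySem.Set.add (dfsTouch node s).vis c) < dfsUnvis RN s.vis := by
          rw [hvis1]; exact dfsUnvis_add_lt RN hck hcv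
        have hu1 : 1 ≤ dfsUnvis RN s.vis := dfsUnvis_pos RN hck hcv
        obtain ⟨f', rfl⟩ : ∃ f', f = f' + 1 := ⟨f - 1, by omega⟩
        set s2 : DfsSt := { dfsTouch node s with vis := PySem.Set.add (dfsTouch node s).vis c }
          with hs2
        have hs2v : s2.vis = PySem.Set.add (dfsTouch node s).vis c := rfl
        have hu2 : dfsUnvis RN s2.vis ≤ u - 1 := by rw [hs2v]; omega
        have hf2 : dfsUnvis RN s2.vis < f' := by rw [hs2v]; omega
        rw [ihu (u - 1) (by omega) ((PySem.Dict.mk RN).getD c []) c ((node, cs') :: rest) s2 f' hu2 hf2]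
        have hvv : dfsFinish c (dfsChildren RN f' ((PySem.Dict.mk RN).getD c []) (dfsTouch c s2))
            = dfsVisit RN (f' + 1) c s2 := by
          simp only [dfsVisit]; rfl
        rw [hvv]
        set s3 : DfsSt := dfsVisit RN (f' + 1) c s2 with hs3
        have hu3 : dfsUnvis RN s3.vis ≤ u - 1 :=
          le_trans (dfsUnvis_visit_le RN _ _ _) hu2
        have hf3 : dfsUnvis RN s3.vis < f' + 1 :=
          lt_of_le_of_lt (le_trans (dfsUnvis_visit_le RN _ _ _) (le_of_lt hf2)) (Nat.lt_succ_self _)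
        rw [ihu (u - 1) (by omega) cs' node rest s3 (f' + 1) hu3 hf3]
        have hjm : node ∈ s3.junc := by
          refine ((dfsMono RN (f' + 1)).1 c s2 node).2 ?_
          exact dfsTouch_junc_self node s
        rw [dfsTouch_eq_of_mem hjm]
        simp only [dfsChildren]
        rw [if_neg hv, if_pos hk]
      · -- unvisited child that is a leaf (not a key of RN)
        rename_i hk
        have heq : dfsUnvis RN (PySem.Set.add (dfsTouch node s).vis c) = dfsUnvis RN s.vis := by
          rw [hvis1]
          exact dfsUnvis_add_eq RN (fun hc => hk
            ((PySem.Dict.contains_iff_mem_keys _ _).mpr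
              (by simpa [PySem.Dict.keys, dfsKeys] using hc)))
        set s2 : DfsSt := { dfsTouch node s with vis := PySem.Set.add (dfsTouch node s).vis c }
          with hs2
        have hs2v : s2.vis = PySem.Set.add (dfsTouch node s).vis c := rfl
        rw [ihcs node rest s2 f (by rw [hs2v, heq]; exact hu) (by rw [hs2v, heq]; exact hf)]
        have hjm : node ∈ s2.junc := dfsTouch_junc_self node s
        rw [dfsTouch_eq_of_mem hjm]
        simp only [dfsChildren]
        rw [if_neg hv, if_neg hk]

theorem dfsUnvis_le (RN : List (Int × List Int)) (v : List Int) :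
    dfsUnvis RN v ≤ RN.length := by
  calc dfsUnvis RN v ≤ (PySem.List.dedup (dfsKeys RN)).length := List.countP_le_length
    _ ≤ (dfsKeys RN).length := by
        rw [PySem.List.dedup_eq_ofList]; exact PySem.Set.length_ofList_le _
    _ = RN.length := List.length_map _

-- one iteration of A's source loop is one top-level recursive visit of B
theorem dfsStepEq (RN : List (Int × List Int)) (s : DfsSt) (h : Int) :
    dfsLoop RN [(h, (PySem.Dict.mk RN).getD h [])] s = dfsVisit RN (RN.length + 1) h s := by
  have hb : dfsUnvis RN s.vis ≤ RN.length := dfsUnvis_le RN s.vis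
  rw [dfsMain RN (dfsUnvis RN s.vis) ((PySem.Dict.mk RN).getD h []) h [] s
    (dfsUnvis RN s.vis + 1) le_rfl (Nat.lt_succ_self _)]
  have hvv : dfsFinish h (dfsChildren RN (dfsUnvis RN s.vis + 1)
        ((PySem.Dict.mk RN).getD h []) (dfsTouch h s))
      = dfsVisit RN (dfsUnvis RN s.vis + 2) h s := by
    simp only [dfsVisit]; rfl
  have hnil : ∀ t : DfsSt, dfsLoop RN [] t = t := fun t => by simp [dfsLoop]
  rw [hnil, hvv]
  exact dfsVisit_stab RN h s (by omega) (by omega)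

-- ===== VERDICT (by name: the statement is the Claim_ definition above) =====
theorem dfs_count_depth_spec : Claim_equal_dfs_count_depth := by
  intro RN source_nodes _hdom _hpre
  unfold Spec_dfs_count_depth dfs_count_depth dfs_count_depth_alt
  congr 1
  exact PySem.List.foldl_congr_mem source_nodes _ _ _ (fun acc x _ => dfsStepEq RN acc x)
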